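-- pv_equiv track=rewrite | github.com/pararthshah/anomaly-detective | core/anomalies.py | anomalies_to_weights
-- ===== SOURCE A (Python) =====
-- def anomalies_to_weights(anomaly_list):     # UNUSED- anomalies_to_expweights preferred
--     # TODO: try exponential taper off, instead of discrete one
--     max_time= 0
--     for anomalies in anomaly_list:
--         if len(anomalies) > 0 and anomalies[-1][1] > max_time:
--             max_time= anomalies[-1][1]
--
--     weights= [0]*int(max_time)   # hope that times start from 0
--
--     for anomalies in anomaly_list:
--         for start, end in anomalies:
--             for i in range(int(start), int(end)):
--                 weights[i]+= 1
--     return weights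
-- ===== SOURCE B (Python) =====
-- def anomalies_to_weights(anomaly_list):
--     max_time = 0
--     for anomalies in anomaly_list:
--         if len(anomalies) > 0 and anomalies[-1][1] > max_time:
--             max_time = anomalies[-1][1]
--     diff = [0] * (int(max_time) + 1)
--     for anomalies in anomaly_list:
--         for start, end in anomalies:
--             if start < end:
--                 diff[int(start)] += 1
--                 diff[int(end)] -= 1
--     weights = []
--     total = 0
--     for d in diff[:-1]:
--         total += d
--         weights.append(total)
--     return weights
-- ===== Notes on version B (the rewrite author's own statement) =====
-- stated objective: faster
-- what changed: Replaces the per-timestep increment loop over every interval (cost = sum of interval lengths) by a difference array (+1 at start, -1 at end) followed by one prefix-sum pass.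
-- outside the precondition, e.g. on anomalies_to_weights([[(-1, 1)]]): A returns [2], B returns [0]
import Mathlib
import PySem

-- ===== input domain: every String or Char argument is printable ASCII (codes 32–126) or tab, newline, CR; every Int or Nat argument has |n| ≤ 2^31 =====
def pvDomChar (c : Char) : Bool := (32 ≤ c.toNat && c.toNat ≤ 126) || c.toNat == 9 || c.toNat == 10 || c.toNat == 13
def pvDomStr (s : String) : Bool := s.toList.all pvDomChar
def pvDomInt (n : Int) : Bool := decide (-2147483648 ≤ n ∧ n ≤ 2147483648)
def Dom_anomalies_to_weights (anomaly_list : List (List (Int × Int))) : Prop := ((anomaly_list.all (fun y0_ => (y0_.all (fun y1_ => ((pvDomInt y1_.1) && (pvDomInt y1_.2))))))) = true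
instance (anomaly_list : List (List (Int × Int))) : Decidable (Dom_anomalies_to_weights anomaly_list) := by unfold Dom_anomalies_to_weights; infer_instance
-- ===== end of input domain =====

-- B replaces A's per-timestep increment loop over every interval by a difference array
-- (+1 at start, -1 at end) and one prefix-sum pass (objective: faster, asymptotically).


-- ===== PORT A =====
-- shared first loop of both Pythons: max_time accumulation ('anomalies[-1][1]' guarded by len > 0)
def pvMaxTime (anomaly_list : List (List (Int × Int))) : Int :=
  anomaly_list.foldl (fun m a =>
    if 0 < a.length then
      match a.getLast? with
      | some p => if p.2 > m then p.2 else m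
      | none => m
    else m) 0

-- 'weights[i] += 1'; pySetD/pyGetD are the total forms of Python indexing, exact under Pre_
def pvIncr (w : List Int) (i : Int) : List Int :=
  PySem.List.pySetD w i (PySem.List.pyGetD w i 0 + 1)

-- 'for i in range(int(start), int(end)): weights[i] += 1'
def pvIncrRange (w : List Int) (p : Int × Int) : List Int :=
  (PySem.List.pyRange p.1 p.2 1).foldl pvIncr w

def anomalies_to_weights (anomaly_list : List (List (Int × Int))) : List Int :=
  let maxTime := pvMaxTime anomaly_list
  let weights := List.replicate maxTime.toNat 0
  anomaly_list.foldl (fun w a => a.foldl pvIncrRange w) weights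

-- ===== PORT B =====
-- 'if start < end: diff[start] += 1; diff[end] -= 1'
def pvDiffAdd (d : List Int) (p : Int × Int) : List Int :=
  if p.1 < p.2 then
    let d1 := PySem.List.pySetD d p.1 (PySem.List.pyGetD d p.1 0 + 1)
    PySem.List.pySetD d1 p.2 (PySem.List.pyGetD d1 p.2 0 - 1)
  else d

def anomalies_to_weights_alt (anomaly_list : List (List (Int × Int))) : List Int :=
  let maxTime := pvMaxTime anomaly_list
  let diff := List.replicate (maxTime.toNat + 1) 0
  let diff := anomaly_list.foldl (fun d a => a.foldl pvDiffAdd d) diff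
  -- 'total = 0; for d in diff[:-1]: total += d; weights.append(total)'
  ((PySem.List.slice diff none (some (-1))).foldl
    (fun (acc : List Int × Int) d => (acc.1 ++ [acc.2 + d], acc.2 + d)) (([] : List Int), (0 : Int))).1

-- ===== PRECONDITION & SPEC =====
def pvPreMax (l : List (List (Int × Int))) : Int :=
  (l.filterMap List.getLast?).foldl (fun m p => max m p.2) 0

-- Pre_ excludes inputs where some nonempty interval reaches outside [0, max_time) — outside the
-- code's own 'hope that times start from 0' domain: there A either raises IndexError or silently
-- wraps negative start times onto the end of the weights array, and B's difference array wraps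
-- them onto its own (different) last cell — both values are accidents of Python negative indexing
-- and neither is the value anyone would specify.
def Pre_anomalies_to_weights (anomaly_list : List (List (Int × Int))) : Prop :=
  ∀ a ∈ anomaly_list, ∀ p ∈ a, p.1 < p.2 → 0 ≤ p.1 ∧ p.2 ≤ pvPreMax anomaly_list
instance (anomaly_list : List (List (Int × Int))) : Decidable (Pre_anomalies_to_weights anomaly_list) := by
  unfold Pre_anomalies_to_weights; infer_instance

def pvWitness_anomalies_to_weights : (List (List (Int × Int))) := ([[(0, 2), (1, 3)]])

def Spec_anomalies_to_weights (anomaly_list : List (List (Int × Int))) (out : List Int) : Prop := out = anomalies_to_weights_alt anomaly_list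
instance (anomaly_list : List (List (Int × Int))) (out : List Int) : Decidable (Spec_anomalies_to_weights anomaly_list out) := by unfold Spec_anomalies_to_weights; infer_instance

-- ===== CLAIM (what is proved, stated in full; the proofs are below) =====
def Claim_equal_anomalies_to_weights : Prop := ∀ (anomaly_list : List (List (Int × Int))), Dom_anomalies_to_weights anomaly_list → Pre_anomalies_to_weights anomaly_list → Spec_anomalies_to_weights anomaly_list (anomalies_to_weights anomaly_list)

-- ===== LEMMAS AND PROOFS =====

-- the Pre_ bound is the same number both ports compute as max_time
theorem pvPreMax_eq_aux (l : List (List (Int × Int))) (m : Int) :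
    (l.filterMap List.getLast?).foldl (fun m p => max m p.2) m =
      l.foldl (fun m a =>
        if 0 < a.length then
          match a.getLast? with
          | some p => if p.2 > m then p.2 else m
          | none => m
        else m) m := by
  induction l generalizing m with
  | nil => rfl
  | cons a l ih =>
    cases h : a.getLast? with
    | none =>
      have ha : a = [] := List.getLast?_eq_none_iff.mp h
      simp [ha, ih]
    | some p =>
      have ha : 0 < a.length := by
        cases a with
        | nil => simp at h
        | cons x xs => simp
      simp only [List.filterMap_cons, h, List.foldl_cons, ha]
      rw [ih]
      congr 1
      rcases le_total p.2 m with hle | hle2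
      · simp [max_eq_left hle]; omega
      · simp [max_eq_right hle2]; omega

theorem pvPreMax_eq (l : List (List (Int × Int))) : pvPreMax l = pvMaxTime l :=
  pvPreMax_eq_aux l 0

theorem pvMaxTime_nonneg_aux (l : List (List (Int × Int))) (m : Int) :
    m ≤ (l.filterMap List.getLast?).foldl (fun m p => max m p.2) m := by
  induction l generalizing m with
  | nil => simp
  | cons a l ih =>
    cases h : a.getLast? with
    | none => simpa [List.filterMap_cons, h] using ih m
    | some p =>
      simp only [List.filterMap_cons, h, List.foldl_cons]
      exact le_trans (le_max_left m p.2) (ih _)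

theorem pvMaxTime_nonneg (l : List (List (Int × Int))) : 0 ≤ pvMaxTime l := by
  have := pvMaxTime_nonneg_aux l 0
  rwa [pvPreMax_eq_aux] at this

-- length preservation
theorem length_pvIncr (w : List Int) (i : Int) : (pvIncr w i).length = w.length := by
  simp [pvIncr, PySem.List.length_pySetD]

theorem length_pvIncrRange (w : List Int) (p : Int × Int) :
    (pvIncrRange w p).length = w.length := by
  unfold pvIncrRange
  generalize PySem.List.pyRange p.1 p.2 1 = r
  induction r generalizing w with
  | nil => rfl
  | cons x r ih => simp [List.foldl_cons, ih, length_pvIncr]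

theorem length_pvDiffAdd (d : List Int) (p : Int × Int) :
    (pvDiffAdd d p).length = d.length := by
  unfold pvDiffAdd
  split <;> simp [PySem.List.length_pySetD]

theorem length_foldl_pres {α : Type} (f : List Int → α → List Int)
    (hf : ∀ w x, (f w x).length = w.length) :
    ∀ (L : List α) (w : List Int), (L.foldl f w).length = w.length := by
  intro L
  induction L with
  | nil => intro w; rfl
  | cons x L ih => intro w; simp [List.foldl_cons, ih, hf]

-- coverage count at time i
def pvCov (L : List (Int × Int)) (i : Nat) : Int :=
  (L.map (fun p => if p.1 ≤ (i : Int) ∧ (i : Int) < p.2 then (1 : Int) else 0)).sum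

theorem getD_set (xs : List Int) (j : Nat) (v : Int) (i : Nat) (hj : j < xs.length) :
    (xs.set j v).getD i 0 = if i = j then v else xs.getD i 0 := by
  rcases eq_or_ne i j with rfl | hne
  · simp [List.getD_eq_getElem?_getD, hj]
  · simp [List.getD_eq_getElem?_getD, List.getElem?_set_ne (by omega : j ≠ i)]
    intro h; omega

theorem pvIncr_getD (w : List Int) (j : Int) (i : Nat) (h0 : 0 ≤ j) (hj : j < (w.length : Int)) :
    (pvIncr w j).getD i 0 = w.getD i 0 + (if (i : Int) = j then 1 else 0) := by
  unfold pvIncr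
  rw [PySem.List.pySetD_of_nonneg _ _ h0, PySem.List.pyGetD_of_nonneg _ _ h0,
      getD_set _ _ _ _ (by omega)]
  by_cases hi : i = j.toNat
  · subst hi; rw [if_pos rfl, if_pos (by omega)]
  · rw [if_neg hi, if_neg (by omega), add_zero]

theorem pvIncrRange_getD_aux (n : Nat) : ∀ (s e : Int) (w : List Int) (i : Nat),
    (e - s).toNat = n → 0 ≤ s → e ≤ (w.length : Int) →
    (pvIncrRange w (s, e)).getD i 0 =
      w.getD i 0 + (if s ≤ (i : Int) ∧ (i : Int) < e then 1 else 0) := by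
  induction n with
  | zero =>
    intro s e w i hn hs hlen
    rw [show pvIncrRange w (s, e) = w by
      unfold pvIncrRange; rw [PySem.List.pyRange_one_eq_nil (by omega)]; rfl]
    have : ¬(s ≤ (i : Int) ∧ (i : Int) < e) := by omega
    simp [this]
  | succ n ih =>
    intro s e w i hn hs hlen
    unfold pvIncrRange
    rw [PySem.List.pyRange_one_cons (by omega), List.foldl_cons]
    rw [show (PySem.List.pyRange (s + 1) e 1).foldl pvIncr (pvIncr w s) =
          pvIncrRange (pvIncr w s) (s + 1, e) from rfl]
    rw [ih (s + 1) e (pvIncr w s) i (by omega) (by omega)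
      (by rw [length_pvIncr]; exact hlen)]
    rw [pvIncr_getD w s i hs (by omega)]
    generalize w.getD i 0 = x
    split_ifs <;> omega

theorem pvIncrRange_getD (e s : Int) (w : List Int) (i : Nat)
    (hv : s < e → 0 ≤ s ∧ e ≤ (w.length : Int)) :
    (pvIncrRange w (s, e)).getD i 0 =
      w.getD i 0 + (if s ≤ (i : Int) ∧ (i : Int) < e then 1 else 0) := by
  by_cases hle : e ≤ s
  · rw [show pvIncrRange w (s, e) = w by
      unfold pvIncrRange; rw [PySem.List.pyRange_one_eq_nil hle]; rfl]
    have : ¬(s ≤ (i : Int) ∧ (i : Int) < e) := by omega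
    simp [this]
  · obtain ⟨h0, hlen⟩ := hv (by omega)
    exact pvIncrRange_getD_aux (e - s).toNat s e w i rfl h0 hlen

theorem foldl_pvIncrRange_getD (L : List (Int × Int)) (w : List Int) (i : Nat)
    (hv : ∀ p ∈ L, p.1 < p.2 → 0 ≤ p.1 ∧ p.2 ≤ (w.length : Int)) :
    (L.foldl pvIncrRange w).getD i 0 = w.getD i 0 + pvCov L i := by
  induction L generalizing w with
  | nil => simp [pvCov]
  | cons p L ih =>
    rw [List.foldl_cons, ih _ (by
      intro q hq hlt
      rw [length_pvIncrRange]
      exact hv q (List.mem_cons_of_mem _ hq) hlt)]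
    rw [show pvIncrRange w p = pvIncrRange w (p.1, p.2) by rfl]
    rw [pvIncrRange_getD p.2 p.1 w i (hv p List.mem_cons_self)]
    simp only [pvCov, List.map_cons, List.sum_cons]
    ring

-- B side: prefix sums of the difference array
theorem sum_take_set (d : List Int) (j : Nat) (v : Int) (n : Nat) (hj : j < d.length) :
    ((d.set j v).take n).sum = (d.take n).sum + (if j < n then v - d.getD j 0 else 0) := by
  induction d generalizing j n with
  | nil => simp at hj
  | cons x ds ih =>
    cases j with
    | zero =>
      cases n with
      | zero => simp
      | succ n => simp [List.set_cons_zero, List.take_succ_cons]; ring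
    | succ j =>
      cases n with
      | zero => simp
      | succ n =>
        simp only [List.set_cons_succ, List.take_succ_cons, List.sum_cons,
          List.getD_cons_succ]
        rw [ih j n (by simpa using hj)]
        split_ifs with h1 h2 <;> [skip; omega; omega; skip] <;> ring

theorem pvDiffAdd_sum_take (d : List Int) (p : Int × Int) (n : Nat)
    (hv : p.1 < p.2 → 0 ≤ p.1 ∧ p.2 < (d.length : Int)) :
    ((pvDiffAdd d p).take n).sum = (d.take n).sum +
      (if p.1 < p.2 then
        (if p.1 < (n : Int) then (1 : Int) else 0) - (if p.2 < (n : Int) then 1 else 0)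
      else 0) := by
  by_cases hlt : p.1 < p.2
  · obtain ⟨h0, hlen⟩ := hv hlt
    have h02 : (0 : Int) ≤ p.2 := by omega
    simp only [pvDiffAdd, if_pos hlt]
    rw [PySem.List.pySetD_of_nonneg _ _ h0, PySem.List.pyGetD_of_nonneg _ _ h0,
        PySem.List.pySetD_of_nonneg _ _ h02, PySem.List.pyGetD_of_nonneg _ _ h02]
    rw [sum_take_set _ p.2.toNat _ n (by rw [List.length_set]; omega)]
    rw [sum_take_set d p.1.toNat _ n (by omega)]
    rw [getD_set d p.1.toNat _ p.2.toNat (by omega)]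
    rw [if_neg (show ¬ p.2.toNat = p.1.toNat by omega)]
    have e1 : (if p.1.toNat < n then d.getD p.1.toNat 0 + 1 - d.getD p.1.toNat 0 else 0)
        = (if p.1 < (n : Int) then (1 : Int) else 0) := by
      split_ifs with h1 h2 h3
      · ring
      · exfalso; omega
      · exfalso; omega
      · rfl
    have e2 : (if p.2.toNat < n then d.getD p.2.toNat 0 - 1 - d.getD p.2.toNat 0 else 0)
        = -(if p.2 < (n : Int) then (1 : Int) else 0) := by
      split_ifs with h1 h2 h3
      · ring
      · exfalso; omega
      · exfalso; omega
      · ring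
    rw [e1, e2]
    ring
  · simp [pvDiffAdd, hlt]

theorem foldl_pvDiffAdd_sum_take (L : List (Int × Int)) (d : List Int) (i : Nat)
    (hv : ∀ p ∈ L, p.1 < p.2 → 0 ≤ p.1 ∧ p.2 < (d.length : Int)) :
    ((L.foldl pvDiffAdd d).take (i + 1)).sum = (d.take (i + 1)).sum + pvCov L i := by
  induction L generalizing d with
  | nil => simp [pvCov]
  | cons p L ih =>
    rw [List.foldl_cons, ih _ (by
      intro q hq hlt
      rw [length_pvDiffAdd]
      exact hv q (List.mem_cons_of_mem _ hq) hlt)]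
    rw [pvDiffAdd_sum_take d p (i + 1) (hv p List.mem_cons_self)]
    simp only [pvCov, List.map_cons, List.sum_cons]
    have : (if p.1 < p.2 then
        (if p.1 < ((i + 1 : Nat) : Int) then (1 : Int) else 0) - (if p.2 < ((i + 1 : Nat) : Int) then 1 else 0)
      else 0) = (if p.1 ≤ (i : Int) ∧ (i : Int) < p.2 then 1 else 0) := by
      split_ifs <;> omega
    rw [this]; ring

-- the accumulating scan loop of B
theorem scan_fst (xs : List Int) (acc : List Int) (t : Int) :
    (xs.foldl (fun (acc : List Int × Int) d => (acc.1 ++ [acc.2 + d], acc.2 + d)) (acc, t)).1 =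
      acc ++ (List.range xs.length).map (fun k => t + ((xs.take (k + 1)).sum)) := by
  induction xs generalizing acc t with
  | nil => simp
  | cons x xs ih =>
    rw [List.foldl_cons, ih]
    simp only [List.length_cons, List.range_succ_eq_map, List.map_cons, List.map_map]
    simp [List.append_assoc, Function.comp, List.take_succ_cons]
    intro a _
    ring

-- ===== VERDICT (by name: the statement is the Claim_ definition above) =====
theorem anomalies_to_weights_spec : Claim_equal_anomalies_to_weights := by
  intro l _hDom hPre
  unfold Spec_anomalies_to_weights
  have hM0 : 0 ≤ pvMaxTime l := pvMaxTime_nonneg l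
  have hPre' : ∀ p ∈ l.flatten, p.1 < p.2 → 0 ≤ p.1 ∧ p.2 ≤ pvMaxTime l := by
    intro p hp hlt
    rcases List.mem_flatten.mp hp with ⟨a, ha, hpa⟩
    have := hPre a ha p hpa hlt
    rwa [pvPreMax_eq] at this
  simp only [anomalies_to_weights, anomalies_to_weights_alt]
  rw [← List.foldl_flatten, ← List.foldl_flatten]
  generalize hL : l.flatten = L at hPre'
  generalize hn : (pvMaxTime l).toNat = n at *
  have hnM : ((n : Nat) : Int) = pvMaxTime l := by omega
  have hvA : ∀ p ∈ L, p.1 < p.2 → 0 ≤ p.1 ∧ p.2 ≤ (((List.replicate n (0:Int)).length : Nat) : Int) := by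
    intro p hp hlt
    obtain ⟨h1, h2⟩ := hPre' p hp hlt
    rw [List.length_replicate, hnM]
    exact ⟨h1, h2⟩
  have hvD : ∀ p ∈ L, p.1 < p.2 → 0 ≤ p.1 ∧ p.2 < (((List.replicate (n+1) (0:Int)).length : Nat) : Int) := by
    intro p hp hlt
    obtain ⟨h1, h2⟩ := hPre' p hp hlt
    rw [List.length_replicate]
    constructor
    · exact h1
    · push_cast; omega
  have hlenA : (L.foldl pvIncrRange (List.replicate n (0:Int))).length = n := by
    rw [length_foldl_pres _ length_pvIncrRange, List.length_replicate]
  have hlenD : (L.foldl pvDiffAdd (List.replicate (n+1) (0:Int))).length = n + 1 := by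
    rw [length_foldl_pres _ length_pvDiffAdd, List.length_replicate]
  rw [PySem.List.slice_to_neg_one, scan_fst, List.nil_append, List.length_dropLast, hlenD]
  apply List.ext_getElem
  · rw [hlenA, List.length_map, List.length_range]
    omega
  · intro i h1 h2
    have hi : i < n := by
      rw [List.length_map, List.length_range] at h2
      omega
    rw [List.getElem_map, List.getElem_range]
    rw [List.dropLast_eq_take, List.take_take, hlenD,
        show min (i + 1) (n + 1 - 1) = i + 1 by omega]
    rw [foldl_pvDiffAdd_sum_take L _ i hvD]
    rw [show ((List.replicate (n+1) (0:Int)).take (i+1)).sum = 0 by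
      rw [List.take_replicate]; simp]
    rw [show (L.foldl pvIncrRange (List.replicate n (0:Int)))[i] =
          (L.foldl pvIncrRange (List.replicate n (0:Int))).getD i 0 from
      (List.getD_eq_getElem _ 0 (by omega)).symm]
    rw [foldl_pvIncrRange_getD L _ i hvA]
    rw [show (List.replicate n (0:Int)).getD i 0 = 0 by
      simp [List.getD_eq_getElem?_getD, hi]]
    ring
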